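-- pv_equiv track=rewrite | github.com/MarkGillespie/alg-textiles | knitting/lace_knitter.py | get_offset_to_stitch_map
-- ===== SOURCE A (Python) =====
-- def get_offset_to_stitch_map(offsets, stitches=None):
--     if not stitches:
--         stitches = list(range(len(offsets)))
--
--     offset_amts = sorted(list(set(offsets)))
--     offset_stitches = {}
--     for off in offset_amts:
--         these_stitches = []
--         for i in range(len(offsets)):
--             if offsets[i] == off:
--                 these_stitches.append(stitches[i])
--         offset_stitches[off] = these_stitches
--     return (offset_amts, offset_stitches)
-- ===== SOURCE B (Python) =====
-- def get_offset_to_stitch_map(offsets, stitches=None):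
--     if not stitches:
--         stitches = list(range(len(offsets)))
--
--     pairs = sorted(zip(offsets, stitches), key=lambda p: p[0])
--     groups = []
--     for off, s in pairs:
--         if groups and groups[-1][0] == off:
--             groups[-1] = (off, groups[-1][1] + [s])
--         else:
--             groups.append((off, [s]))
--     offset_amts = [off for off, _ in groups]
--     offset_stitches = {off: g for off, g in groups}
--     return (offset_amts, offset_stitches)
-- ===== Notes on version B (the rewrite author's own statement) =====
-- stated objective: faster
-- what changed: A scans the whole offsets list once per distinct offset value; B sorts the (offset, stitch) pairs once (stable sort) and builds all groups in a single pass over adjacent equal offsets.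
-- outside the precondition, e.g. on get_offset_to_stitch_map([0, 1], [5]): A raises IndexError, B returns ([0], {0: [5]})
import Mathlib
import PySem

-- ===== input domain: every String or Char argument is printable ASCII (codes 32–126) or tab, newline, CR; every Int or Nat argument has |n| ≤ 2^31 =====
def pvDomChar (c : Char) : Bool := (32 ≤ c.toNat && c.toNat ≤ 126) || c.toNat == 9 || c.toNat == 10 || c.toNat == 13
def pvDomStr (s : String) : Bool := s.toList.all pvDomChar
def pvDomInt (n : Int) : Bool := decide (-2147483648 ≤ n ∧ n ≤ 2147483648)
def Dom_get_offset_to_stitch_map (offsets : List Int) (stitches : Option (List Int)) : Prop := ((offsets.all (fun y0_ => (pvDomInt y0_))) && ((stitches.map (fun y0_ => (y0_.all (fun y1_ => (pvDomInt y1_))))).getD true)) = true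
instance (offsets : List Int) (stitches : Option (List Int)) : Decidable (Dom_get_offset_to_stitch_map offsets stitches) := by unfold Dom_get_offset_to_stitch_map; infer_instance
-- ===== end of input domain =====

-- B replaces A's scan-of-all-offsets-per-distinct-offset with one stable sort of the
-- (offset, stitch) pairs followed by a single grouping pass over adjacent equal offsets.

-- ===== PORT A =====
def get_offset_to_stitch_map (offsets : List Int) (stitches : Option (List Int)) : List Int × (List (Int × List Int)) :=
  let st := match stitches with
    | none => PySem.List.pyRange 0 (PySem.List.len offsets) 1
    | some s => if s = [] then PySem.List.pyRange 0 (PySem.List.len offsets) 1 else s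
  let offset_amts := PySem.List.sorted (PySem.Set.ofList offsets) (fun x => x)
  let offset_stitches := offset_amts.foldl (fun d off =>
      let these_stitches := (PySem.List.pyRange 0 (PySem.List.len offsets) 1).foldl
        (fun acc i => if PySem.List.pyGetD offsets i 0 = off then acc ++ [PySem.List.pyGetD st i 0] else acc) []
      d.insert off these_stitches) (PySem.Dict.empty)
  (offset_amts, offset_stitches.items)

-- ===== PORT B =====
def get_offset_to_stitch_map_alt (offsets : List Int) (stitches : Option (List Int)) : List Int × (List (Int × List Int)) :=
  let st := match stitches with
    | none => PySem.List.pyRange 0 (PySem.List.len offsets) 1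
    | some s => if s = [] then PySem.List.pyRange 0 (PySem.List.len offsets) 1 else s
  let pairs := PySem.List.sorted (offsets.zip st) (fun p => p.1)
  let groups := pairs.foldl (fun groups p =>
      if groups ≠ [] ∧ (PySem.List.pyGetD groups (-1) (0, [])).1 = p.1 then
        PySem.List.pySetD groups (-1) (p.1, (PySem.List.pyGetD groups (-1) (0, [])).2 ++ [p.2])
      else groups ++ [(p.1, [p.2])]) []
  (groups.map (fun g => g.1),
   (groups.foldl (fun d g => d.insert g.1 g.2) PySem.Dict.empty).items)

-- ===== PRECONDITION & SPEC =====
-- Pre_ excludes only the inputs where A raises IndexError: a non-empty stitches list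
-- shorter than offsets (A indexes stitches[i] for every i < len(offsets)).
def Pre_get_offset_to_stitch_map (offsets : List Int) (stitches : Option (List Int)) : Prop :=
  stitches.getD [] = [] ∨ offsets.length ≤ (stitches.getD []).length
instance (offsets : List Int) (stitches : Option (List Int)) : Decidable (Pre_get_offset_to_stitch_map offsets stitches) := by unfold Pre_get_offset_to_stitch_map; infer_instance

def pvWitness_get_offset_to_stitch_map : List Int × Option (List Int) := ([2, 1, 2], some [10, 20, 30])

def Spec_get_offset_to_stitch_map (offsets : List Int) (stitches : Option (List Int)) (out : List Int × (List (Int × List Int))) : Prop := out = get_offset_to_stitch_map_alt offsets stitches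
instance (offsets : List Int) (stitches : Option (List Int)) (out : List Int × (List (Int × List Int))) : Decidable (Spec_get_offset_to_stitch_map offsets stitches out) := by unfold Spec_get_offset_to_stitch_map; infer_instance

-- ===== CLAIM (what is proved, stated in full; the proofs are below) =====
def Claim_equal_get_offset_to_stitch_map : Prop := ∀ (offsets : List Int) (stitches : Option (List Int)), Dom_get_offset_to_stitch_map offsets stitches → Pre_get_offset_to_stitch_map offsets stitches → Spec_get_offset_to_stitch_map offsets stitches (get_offset_to_stitch_map offsets stitches)


-- ===== LEMMAS AND PROOFS =====

lemma pv_pyGetD_last {α : Type} (xs : List α) (a d : α) :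
    PySem.List.pyGetD (xs ++ [a]) (-1) d = a := by
  simp [PySem.List.pyGetD, PySem.List.pyGet?, PySem.List.pyIdx?]

lemma pv_pySetD_last {α : Type} (xs : List α) (a v : α) :
    PySem.List.pySetD (xs ++ [a]) (-1) v = xs ++ [v] := by
  simp [PySem.List.pySetD, PySem.List.pySet?, PySem.List.pyIdx?, List.set_append]

-- inserting x past a prefix none of whose elements come 'before' x
lemma pv_insertBy_append (bef : (Int × Int) → (Int × Int) → Bool) (x : Int × Int)
    (as bs : List (Int × Int)) (h : ∀ y ∈ as, bef x y = false) :
    PySem.List.insertBy bef x (as ++ bs) = as ++ PySem.List.insertBy bef x bs := by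
  induction as with
  | nil => simp
  | cons a t ih =>
      have ha : bef x a = false := h a (by simp)
      simp only [List.cons_append, PySem.List.insertBy, ha]
      simp [ih (fun y hy => h y (by simp [hy]))]

-- stability of the insertion-sort fold: it groups the pairs by key, keys in the order of ks
lemma pv_foldl_insertBy_flatMap (ks : List Int) (hks : ks.Pairwise (· < ·)) :
    ∀ (qs : List (Int × Int)), (∀ p ∈ qs, p.1 ∈ ks) →
      qs.foldl (fun acc x => PySem.List.insertBy (fun a b => decide (a.1 < b.1)) x acc) [] =
        ks.flatMap (fun k => qs.filter (fun p => decide (p.1 = k))) := by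
  intro qs
  induction qs using List.reverseRecOn with
  | nil => simp
  | append_singleton qs p ih =>
      intro h
      have hqs : ∀ x ∈ qs, x.1 ∈ ks := fun x hx => h x (by simp [hx])
      have hp : p.1 ∈ ks := h p (by simp)
      rw [List.foldl_append, List.foldl_cons, List.foldl_nil, ih hqs]
      obtain ⟨as, bs, rfl⟩ := List.append_of_mem hp
      rw [List.pairwise_append] at hks
      obtain ⟨-, hbs, hcross⟩ := hks
      rw [List.pairwise_cons] at hbs
      have halt : ∀ a ∈ as, a < p.1 := fun a haa => hcross a haa p.1 (by simp)
      have hbgt : ∀ b ∈ bs, p.1 < b := hbs.1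
      -- LHS: insert p after the groups of keys ≤ p.1
      rw [List.flatMap_append, List.flatMap_cons, ← List.append_assoc]
      rw [pv_insertBy_append _ _ _ _ (by
        intro y hy
        have hyle : y.1 ≤ p.1 := by
          rcases List.mem_append.mp hy with hy | hy
          · obtain ⟨a, haa, hya⟩ := List.mem_flatMap.mp hy
            have h1 : y.1 = a := by simpa using (List.mem_filter.mp hya).2
            have := halt a haa
            omega
          · have h1 : y.1 = p.1 := by simpa using (List.mem_filter.mp hy).2
            omega
        simp
        omega)]
      -- RHS: only the group of p.1 gains [p]
      rw [List.flatMap_append, List.flatMap_cons]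
      have has : (as.flatMap fun k => (qs ++ [p]).filter (fun q => decide (q.1 = k)))
          = as.flatMap fun k => qs.filter (fun q => decide (q.1 = k)) := by
        apply List.flatMap_congr
        intro k hk
        have hne : p.1 ≠ k := by have := halt k hk; omega
        simp [List.filter_append, hne]
      have hbs2 : (bs.flatMap fun k => (qs ++ [p]).filter (fun q => decide (q.1 = k)))
          = bs.flatMap fun k => qs.filter (fun q => decide (q.1 = k)) := by
        apply List.flatMap_congr
        intro k hk
        have hne : p.1 ≠ k := by have := hbgt k hk; omega
        simp [List.filter_append, hne]
      have hgrp : (qs ++ [p]).filter (fun q => decide (q.1 = p.1))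
          = qs.filter (fun q => decide (q.1 = p.1)) ++ [p] := by
        simp [List.filter_append]
      rw [has, hbs2, hgrp]
      -- now discharge by cases on the tail
      cases hbt : bs.flatMap (fun k => qs.filter (fun q => decide (q.1 = k))) with
      | nil => simp [PySem.List.insertBy]
      | cons y ys =>
          have hy : y ∈ bs.flatMap (fun k => qs.filter (fun q => decide (q.1 = k))) := by
            rw [hbt]; simp
          obtain ⟨b, hb, hyb⟩ := List.mem_flatMap.mp hy
          have hy1 : y.1 = b := by simpa using (List.mem_filter.mp hyb).2
          have : decide (p.1 < y.1) = true := by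
            have := hbgt b hb; simp [hy1]; omega
          simp only [PySem.List.insertBy, this]
          simp

-- the grouping pass, run across one full run of equal keys
lemma pv_fold_run (k : Int) (g : List (Int × Int)) (hg : ∀ p ∈ g, p.1 = k) :
    ∀ (bs : List (Int × List Int)) (l : List Int),
      g.foldl (fun groups p =>
        if groups ≠ [] ∧ (PySem.List.pyGetD groups (-1) (0, [])).1 = p.1 then
          PySem.List.pySetD groups (-1) (p.1, (PySem.List.pyGetD groups (-1) (0, [])).2 ++ [p.2])
        else groups ++ [(p.1, [p.2])]) (bs ++ [(k, l)])
      = bs ++ [(k, l ++ g.map (fun p => p.2))] := by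
  induction g with
  | nil => simp
  | cons p t ih =>
      intro bs l
      have hk : p.1 = k := hg p (by simp)
      rw [List.foldl_cons]
      have hcond : (bs ++ [(k, l)] : List (Int × List Int)) ≠ [] ∧
          (PySem.List.pyGetD (bs ++ [(k, l)]) (-1) (0, ([] : List Int))).1 = p.1 := by
        constructor
        · simp
        · rw [pv_pyGetD_last]; simp [hk]
      rw [if_pos hcond, pv_pyGetD_last, pv_pySetD_last, hk]
      rw [ih (fun q hq => hg q (by simp [hq])) bs (l ++ [p.2])]
      simp

-- the grouping pass consumes a key-grouped list group by group
lemma pv_fold_groups (G : Int → List (Int × Int)) :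
    ∀ (ks : List Int), ks.Pairwise (· < ·) →
      (∀ k ∈ ks, G k ≠ [] ∧ ∀ p ∈ G k, p.1 = k) →
      ∀ (acc : List (Int × List Int)),
        (∀ k ∈ ks, acc = [] ∨ (PySem.List.pyGetD acc (-1) (0, [])).1 ≠ k) →
      (ks.flatMap G).foldl (fun groups p =>
        if groups ≠ [] ∧ (PySem.List.pyGetD groups (-1) (0, [])).1 = p.1 then
          PySem.List.pySetD groups (-1) (p.1, (PySem.List.pyGetD groups (-1) (0, [])).2 ++ [p.2])
        else groups ++ [(p.1, [p.2])]) acc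
      = acc ++ ks.map (fun k => (k, (G k).map (fun p => p.2))) := by
  intro ks
  induction ks with
  | nil => simp
  | cons k ks' ih =>
      intro hpw hG acc hacc
      obtain ⟨hne, hkeys⟩ := hG k (by simp)
      rw [List.pairwise_cons] at hpw
      cases hGk : G k with
      | nil => exact absurd hGk hne
      | cons p g' =>
          have hpk : p.1 = k := hkeys p (by simp [hGk])
          rw [List.flatMap_cons, hGk, List.cons_append, List.foldl_cons, List.foldl_append]
          have hcond : ¬ (acc ≠ [] ∧ (PySem.List.pyGetD acc (-1) (0, ([] : List Int))).1 = p.1) := by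
            rcases hacc k (by simp) with h | h
            · simp [h]
            · rw [hpk]; tauto
          rw [if_neg hcond]
          have hg' : ∀ q ∈ g', q.1 = k := fun q hq => hkeys q (by simp [hGk, hq])
          rw [hpk, pv_fold_run k g' hg' acc [p.2]]
          rw [ih hpw.2 (fun k' hk' => (hG k' (by simp [hk'])))
            (acc ++ [(k, [p.2] ++ g'.map (fun q => q.2))]) (by
              intro k' hk'
              right
              rw [pv_pyGetD_last]
              have := hpw.1 k' hk'
              simp
              omega)]
          simp [hGk]

-- A's inner index loop computes the stitches of the zipped pairs whose offset is `off`
lemma pv_inner_loop (offsets st : List Int) (hlen : offsets.length ≤ st.length) (off : Int) :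
    (PySem.List.pyRange 0 (PySem.List.len offsets) 1).foldl
        (fun acc i => if PySem.List.pyGetD offsets i 0 = off then acc ++ [PySem.List.pyGetD st i 0] else acc) [] =
      ((offsets.zip st).filter (fun p => decide (p.1 = off))).map (fun p => p.2) := by
  have hzlen : (offsets.zip st).length = offsets.length := by
    rw [List.length_zip]; omega
  have hr : PySem.List.len offsets = ((offsets.zip st).length : Int) := by
    simp [hzlen]
  rw [hr]
  rw [PySem.List.foldl_congr_mem _ _
    (fun acc i => (fun (acc : List Int) (p : Int × Int) => if p.1 = off then acc ++ [p.2] else acc)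
        acc (PySem.List.pyGetD (offsets.zip st) i (0, 0))) _ (by
      intro acc i hi
      obtain ⟨h0, h1⟩ := PySem.List.mem_pyRange_one.mp hi
      have hnat : i.toNat < (offsets.zip st).length := by omega
      have hno : i.toNat < offsets.length := by omega
      have hns : i.toNat < st.length := by omega
      simp only [PySem.List.pyGetD_of_nonneg _ _ h0, List.getD_eq_getElem _ _ hnat,
        List.getD_eq_getElem _ _ hno, List.getD_eq_getElem _ _ hns]
      simp [List.getElem_zip])]
  rw [PySem.List.foldl_pyRange_zero_pyGetD' (offsets.zip st) (0, 0)
    (fun (acc : List Int) (p : Int × Int) => if p.1 = off then acc ++ [p.2] else acc) []]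
  rw [PySem.List.foldl_append_ite (fun p : Int × Int => p.1 = off) (fun p => p.2)]
  simp

-- the common core: with the effective stitches list fixed and long enough, A's body = B's body
lemma pv_core (offsets st : List Int) (hlen : offsets.length ≤ st.length) :
    (PySem.List.sorted (PySem.Set.ofList offsets) (fun x => x),
      ((PySem.List.sorted (PySem.Set.ofList offsets) (fun x => x)).foldl (fun d off =>
        d.insert off ((PySem.List.pyRange 0 (PySem.List.len offsets) 1).foldl
          (fun acc i => if PySem.List.pyGetD offsets i 0 = off then acc ++ [PySem.List.pyGetD st i 0] else acc) []))
        (PySem.Dict.empty)).items)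
    = (let groups := (PySem.List.sorted (offsets.zip st) (fun p => p.1)).foldl (fun groups p =>
          if groups ≠ [] ∧ (PySem.List.pyGetD groups (-1) (0, [])).1 = p.1 then
            PySem.List.pySetD groups (-1) (p.1, (PySem.List.pyGetD groups (-1) (0, [])).2 ++ [p.2])
          else groups ++ [(p.1, [p.2])]) []
       (groups.map (fun g => g.1),
        (groups.foldl (fun d g => d.insert g.1 g.2) PySem.Dict.empty).items)) := by
  have hfst : (offsets.zip st).map Prod.fst = offsets := List.map_fst_zip hlen
  have hpw : (PySem.List.sorted (PySem.Set.ofList offsets) (fun x => x)).Pairwise (· < ·) :=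
    PySem.List.sorted_ofList_pairwise_lt offsets
  have hmem : ∀ k, k ∈ PySem.List.sorted (PySem.Set.ofList offsets) (fun x => x) ↔ k ∈ offsets := by
    intro k
    rw [PySem.List.mem_sorted, PySem.Set.mem_ofList]
  have hG : ∀ k ∈ PySem.List.sorted (PySem.Set.ofList offsets) (fun x => x),
      (offsets.zip st).filter (fun p => decide (p.1 = k)) ≠ [] ∧
      ∀ p ∈ (offsets.zip st).filter (fun p => decide (p.1 = k)), p.1 = k := by
    intro k hk
    constructor
    · have hko : k ∈ offsets := (hmem k).mp hk
      rw [← hfst] at hko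
      obtain ⟨p, hp, hpk⟩ := List.mem_map.mp hko
      exact List.ne_nil_of_mem (List.mem_filter.mpr ⟨hp, by simp [hpk]⟩)
    · intro p hp
      simpa using (List.mem_filter.mp hp).2
  -- stability: the sorted pairs are the concatenation of the per-key groups
  have hsorted : PySem.List.sorted (offsets.zip st) (fun p => p.1)
      = (PySem.List.sorted (PySem.Set.ofList offsets) (fun x => x)).flatMap
          (fun k => (offsets.zip st).filter (fun p => decide (p.1 = k))) := by
    rw [PySem.List.sorted_eq_foldl_insertBy]
    exact pv_foldl_insertBy_flatMap _ hpw (offsets.zip st) (by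
      intro p hp
      exact (hmem p.1).mpr (by rw [← hfst]; exact List.mem_map_of_mem hp))
  show _ = (_, _)
  rw [hsorted, pv_fold_groups _ _ hpw hG [] (by intro k _; left; rfl)]
  rw [List.nil_append]
  refine Prod.ext ?_ ?_
  · rw [List.map_map]
    have hid : ((fun g : Int × List Int => g.1) ∘ fun k =>
        (k, List.map (fun p => p.2) (List.filter (fun p => decide (p.1 = k)) (offsets.zip st))))
        = fun k : Int => k := rfl
    rw [hid, List.map_id']
  · show _ = PySem.Dict.items _
    rw [List.foldl_map]
    rw [PySem.List.foldl_congr_mem _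
      (fun (d : PySem.Dict Int (List Int)) off =>
        d.insert off ((PySem.List.pyRange 0 (PySem.List.len offsets) 1).foldl
          (fun acc i => if PySem.List.pyGetD offsets i 0 = off then acc ++ [PySem.List.pyGetD st i 0] else acc) []))
      (fun (d : PySem.Dict Int (List Int)) off => d.insert off
        (((offsets.zip st).filter (fun p => decide (p.1 = off))).map (fun p => p.2))) _ (by
        intro d off hoff
        simp only []
        rw [pv_inner_loop offsets st hlen off])]

-- ===== VERDICT (by name: the statement is the Claim_ definition above) =====
theorem get_offset_to_stitch_map_spec : Claim_equal_get_offset_to_stitch_map := by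
  intro offsets stitches _ hpre
  unfold Spec_get_offset_to_stitch_map get_offset_to_stitch_map get_offset_to_stitch_map_alt
  match stitches with
  | none =>
      exact pv_core offsets _ (by simp [PySem.List.length_pyRange_one])
  | some s =>
      by_cases hs : s = []
      · simp only [hs]
        exact pv_core offsets _ (by simp [PySem.List.length_pyRange_one])
      · simp only [if_neg hs]
        have hlen : offsets.length ≤ s.length := by
          rcases hpre with h | h
          · exact absurd (by simpa using h) hs
          · simpa using h
        exact pv_core offsets s hlen
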